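-- pv_equiv track=rewrite | github.com/oimiragieo/tensor-grep | src/tensor_grep/backends/cpu_backend.py | _build_line_trigram_index
-- ===== SOURCE A (Python) =====
-- def _build_line_trigram_index(lines: list[str]) -> dict[str, list[int]]:
--     index: dict[str, set[int]] = {}
--     for line_idx, line in enumerate(lines):
--         if len(line) < 3:
--             continue
--         for start in range(len(line) - 2):
--             trigram = line[start : start + 3]
--             index.setdefault(trigram, set()).add(line_idx)
--     return {trigram: sorted(line_numbers) for trigram, line_numbers in index.items()}
-- ===== SOURCE B (Python) =====
-- def _build_line_trigram_index(lines: list[str]) -> dict[str, list[int]]: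
--     # Two staged passes: discover trigram keys in first-occurrence order, then
--     # build each key's line list by substring-scanning the lines; every key has
--     # length 3, so 't in line' holds exactly when t is a trigram of line, and
--     # each list comes out sorted and duplicate-free with no sets and no sort.
--     keys = dict.fromkeys(t for line in lines
--                          for t in (line[i:i + 3] for i in range(len(line) - 2)))
--     return {t: [i for i, line in enumerate(lines) if t in line] for t in keys}
-- ===== Notes on version B (the rewrite author's own statement) =====
-- stated objective: alternative
-- what changed: Replaces A's single streaming pass building a dict of sets plus a terminal per-key sorted() pass by two staged passes: first collect the trigram keys in first-occurrence order via ordered dedup of the flat trigram stream, then build each key's list by substring-scanning the lines (t in line), so no sets of indices and no sorting are needed.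
import Mathlib
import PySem

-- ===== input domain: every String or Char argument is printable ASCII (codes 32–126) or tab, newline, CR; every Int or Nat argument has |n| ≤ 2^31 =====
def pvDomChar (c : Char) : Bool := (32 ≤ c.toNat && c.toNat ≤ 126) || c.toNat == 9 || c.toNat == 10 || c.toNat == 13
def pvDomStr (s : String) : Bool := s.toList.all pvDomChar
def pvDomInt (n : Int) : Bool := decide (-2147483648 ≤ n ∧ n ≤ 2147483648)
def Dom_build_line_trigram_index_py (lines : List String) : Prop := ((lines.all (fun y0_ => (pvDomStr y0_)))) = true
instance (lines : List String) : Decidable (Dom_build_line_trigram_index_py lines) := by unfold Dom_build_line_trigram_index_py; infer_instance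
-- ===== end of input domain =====

-- B replaces A's streaming dict-of-sets + terminal per-key sorted() pass by two staged
-- passes: ordered dedup of the flat trigram stream for the keys, then one substring scan
-- of the lines per key; no index sets and no sorting (alternative decomposition).

-- ===== PORT A =====
-- index.setdefault(trigram, set()).add(line_idx) is index[trigram] = index.get(trigram, set()) ∪ {line_idx} = Dict.modify
def build_line_trigram_index_py (lines : List String) : List (String × List Int) :=
  let index : PySem.Dict String (PySem.Set Int) :=
    (PySem.List.enumerate lines).foldl
      (fun index p =>
        if PySem.Str.len p.2 < 3 then index
        else
          (PySem.List.pyRange 0 (PySem.Str.len p.2 - 2) 1).foldl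
            (fun index start =>
              index.modify (PySem.Str.slice p.2 (some start) (some (start + 3)))
                PySem.Set.empty (fun s => PySem.Set.add s p.1))
            index)
      PySem.Dict.empty
  index.items.map (fun q => (q.1, PySem.List.sorted q.2 (fun x => x)))

-- ===== PORT B =====
-- keys = dict.fromkeys(flat trigram stream) is PySem.List.dedup of the flatMap;
-- the dict comprehension over the (distinct) keys is a map; 't in line' is PySem.Str.isIn
def build_line_trigram_index_py_alt (lines : List String) : List (String × List Int) :=
  let keys := PySem.List.dedup (lines.flatMap (fun line =>
    (PySem.List.pyRange 0 (PySem.Str.len line - 2) 1).map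
      (fun i => PySem.Str.slice line (some i) (some (i + 3)))))
  keys.map (fun t => (t, ((PySem.List.enumerate lines 0).filter
      (fun p => PySem.Str.isIn t p.2)).map (fun p => p.1)))

-- ===== PRECONDITION & SPEC =====
def Spec_build_line_trigram_index_py (lines : List String) (out : List (String × List Int)) : Prop := out = build_line_trigram_index_py_alt lines
instance (lines : List String) (out : List (String × List Int)) : Decidable (Spec_build_line_trigram_index_py lines out) := by unfold Spec_build_line_trigram_index_py; infer_instance

-- ===== CLAIM (what is proved, stated in full; the proofs are below) =====
def Claim_equal_build_line_trigram_index_py : Prop := ∀ (lines : List String), Dom_build_line_trigram_index_py lines → Spec_build_line_trigram_index_py lines (build_line_trigram_index_py lines)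

-- ===== LEMMAS AND PROOFS =====

-- the list of trigrams of one line, in occurrence order (proof-side abbreviation)
def pvTrig (line : String) : List String :=
  (PySem.List.pyRange 0 (PySem.Str.len line - 2) 1).map
    (fun i => PySem.Str.slice line (some i) (some (i + 3)))

-- A's inner loop over a line's trigram occurrences: final value at each key.
theorem getD_FA (i : Int) : ∀ (ts : List String) (d : PySem.Dict String (List Int)) (t : String),
    (ts.foldl (fun d x => d.modify x [] (fun s => PySem.Set.add s i)) d).getD t []
      = if t ∈ ts then PySem.Set.add (d.getD t []) i else d.getD t [] := by
  intro ts
  induction ts with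
  | nil => intro d t; simp
  | cons a ts ih =>
    intro d t
    simp only [List.foldl_cons, ih, PySem.Dict.getD_modify]
    by_cases h1 : t = a <;> by_cases h2 : t ∈ ts <;>
      simp [h1, h2, List.mem_cons]

-- the per-line dedup-append loop: final value at each key.
theorem getD_FB (i : Int) : ∀ (l : List String), l.Nodup → ∀ (d : PySem.Dict String (List Int)) (t : String),
    (l.foldl (fun d x => d.modify x [] (fun s => s ++ [i])) d).getD t []
      = if t ∈ l then d.getD t [] ++ [i] else d.getD t [] := by
  intro l
  induction l with
  | nil => intro _ d t; simp
  | cons a l ih =>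
    intro hnd d t
    have hal : a ∉ l := (List.nodup_cons.mp hnd).1
    simp only [List.foldl_cons, ih (List.nodup_cons.mp hnd).2, PySem.Dict.getD_modify]
    by_cases h1 : t = a <;> by_cases h2 : t ∈ l <;>
      simp_all [List.mem_cons]

theorem foldl_add_add (s u : PySem.Set String) (x : String) :
    List.foldl PySem.Set.add s (u.add x) = (List.foldl PySem.Set.add s u).add x := by
  by_cases hx : x ∈ u
  · rw [PySem.Set.add_of_mem hx, PySem.Set.add_of_mem ?_]
    rw [← PySem.Set.update_eq_foldl]
    exact (PySem.Set.mem_update _ _ _).mpr (Or.inr hx)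
  · rw [PySem.Set.add_of_not_mem hx, List.foldl_append]
    rfl

theorem foldl_add_assoc : ∀ (l : List String) (u s : PySem.Set String),
    List.foldl PySem.Set.add s (List.foldl PySem.Set.add u l)
      = List.foldl PySem.Set.add (List.foldl PySem.Set.add s u) l := by
  intro l
  induction l with
  | nil => intro u s; rfl
  | cons x l ih =>
    intro u s
    simp only [List.foldl_cons]
    rw [ih (PySem.Set.add u x) s, foldl_add_add]

theorem update_dedup (s : PySem.Set String) (l : List String) :
    PySem.Set.update s (PySem.List.dedup l) = PySem.Set.update s l := by
  rw [PySem.List.dedup_eq_ofList, PySem.Set.ofList_eq_foldl,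
    PySem.Set.update_eq_foldl, PySem.Set.update_eq_foldl, foldl_add_assoc]
  rfl

-- One line's worth of A's work: the occurrence loop equals the dedup-append loop,
-- provided i is absent from every current value.
theorem step_eq (i : Int) (ts : List String) (d : PySem.Dict String (List Int))
    (hnd : d.keys.Nodup) (hb : ∀ t : String, i ∉ d.getD t []) :
    ts.foldl (fun d x => d.modify x [] (fun s => PySem.Set.add s i)) d
      = (PySem.List.dedup ts).foldl (fun d x => d.modify x [] (fun s => s ++ [i])) d := by
  have hndA : (ts.foldl (fun d x => d.modify x [] (fun s => PySem.Set.add s i)) d).keys.Nodup :=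
    PySem.Dict.nodup_keys_foldl_modify_key ts (fun x => x) []
      (fun _ _ => fun s => PySem.Set.add s i) d hnd
  have hndB : ((PySem.List.dedup ts).foldl (fun d x => d.modify x [] (fun s => s ++ [i])) d).keys.Nodup :=
    PySem.Dict.nodup_keys_foldl_modify_key (PySem.List.dedup ts) (fun x => x) []
      (fun _ _ => fun s => s ++ [i]) d hnd
  apply PySem.Dict.ext
  rw [PySem.Dict.items_eq_map_keys _ hndA [], PySem.Dict.items_eq_map_keys _ hndB []]
  rw [PySem.Dict.keys_foldl_modify ts [] (fun _ _ => fun s => PySem.Set.add s i) d,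
    PySem.Dict.keys_foldl_modify (PySem.List.dedup ts) [] (fun _ _ => fun s => s ++ [i]) d,
    update_dedup]
  apply List.map_congr_left
  intro t _
  rw [getD_FA, getD_FB i (PySem.List.dedup ts) (PySem.List.nodup_dedup ts) d t]
  simp only [PySem.List.mem_dedup]
  by_cases h : t ∈ ts
  · simp [h, PySem.Set.add_of_not_mem (hb t)]
  · simp [h]

-- the dedup-append fold over a list of (index, line) pairs (proof-side skeleton)
def pvG (ps : List (Int × String)) (d : PySem.Dict String (List Int)) : PySem.Dict String (List Int) :=
  ps.foldl
    (fun index p =>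
      (PySem.List.dedup (pvTrig p.2)).foldl
        (fun index trigram => index.modify trigram [] (fun l => l ++ [p.1]))
        index) d

-- final value of pvG at each key: the old value extended by the indices of matching lines
theorem pvG_getD : ∀ (ps : List (Int × String)) (d : PySem.Dict String (List Int)) (t : String),
    (pvG ps d).getD t []
      = d.getD t [] ++ (ps.filter (fun p => decide (t ∈ pvTrig p.2))).map (fun p => p.1) := by
  intro ps
  induction ps with
  | nil => intro d t; simp [pvG]
  | cons p ps ih =>
    intro d t
    simp only [pvG, List.foldl_cons] at ih ⊢
    rw [ih, getD_FB p.1 (PySem.List.dedup (pvTrig p.2)) (PySem.List.nodup_dedup _) d t]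
    simp only [PySem.List.mem_dedup, List.filter_cons]
    by_cases h : t ∈ pvTrig p.2 <;> simp [h]

-- final keys of pvG: old keys updated with the flat trigram stream
theorem pvG_keys : ∀ (ps : List (Int × String)) (d : PySem.Dict String (List Int)),
    (pvG ps d).keys = PySem.Set.update d.keys (ps.flatMap (fun p => pvTrig p.2)) := by
  intro ps
  induction ps with
  | nil => intro d; simp [pvG, PySem.Set.update_eq_foldl]
  | cons p ps ih =>
    intro d
    simp only [pvG, List.foldl_cons] at ih ⊢
    rw [ih, PySem.Dict.keys_foldl_modify (PySem.List.dedup (pvTrig p.2)) []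
      (fun _ _ => fun l => l ++ [p.1]) d, update_dedup, List.flatMap_cons,
      PySem.Set.update_eq_foldl, PySem.Set.update_eq_foldl, PySem.Set.update_eq_foldl,
      List.foldl_append]

theorem pvG_nodup_keys (ps : List (Int × String)) (d : PySem.Dict String (List Int))
    (hnd : d.keys.Nodup) : (pvG ps d).keys.Nodup := by
  rw [pvG_keys]
  exact PySem.Set.nodup_update _ _ hnd

-- a per-item flatMap over enumerate forgets the indices
theorem flatMap_enumerate {α β : Type} (f : α → List β) : ∀ (xs : List α) (n : Int),
    (PySem.List.enumerate xs n).flatMap (fun p => f p.2) = xs.flatMap f := by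
  intro xs
  induction xs with
  | nil => intro n; rfl
  | cons x xs ih =>
    intro n
    rw [PySem.List.enumerate_cons, List.flatMap_cons, List.flatMap_cons, ih (n + 1)]

-- every trigram of a line has exactly 3 characters
theorem pvTrig_len3 (line : String) (t : String) (ht : t ∈ pvTrig line) :
    t.toList.length = 3 := by
  simp only [pvTrig, List.mem_map] at ht
  obtain ⟨i, hi, rfl⟩ := ht
  rw [PySem.List.mem_pyRange_one] at hi
  obtain ⟨h0, h2⟩ := hi
  obtain ⟨j, rfl⟩ := Int.eq_ofNat_of_zero_le h0
  have hj : (j : Int) < (line.toList.length : Int) - 2 := by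
    simpa [PySem.Str.len_eq] using h2
  have hjn : j + 3 ≤ line.toList.length := by omega
  rw [PySem.Str.toList_slice, PySem.Chars.slice_eq_listSlice,
    show ((j : Int) + 3) = ((j : Int) + ((3 : Nat) : Int)) by norm_num,
    PySem.List.slice_natCast_add]
  have he : line.toList.length = line.length := by simp
  simp [List.length_take, List.length_drop]
  omega

-- for a 3-character t, membership in the trigram list is the substring test
theorem trig_iff_isIn (t line : String) (hlen : t.toList.length = 3) :
    t ∈ pvTrig line ↔ PySem.Str.isIn t line = true := by
  rw [PySem.Str.isIn_eq, ← PySem.Chars.exists_prefix_drop_iff_isIn]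
  constructor
  · rintro ht
    simp only [pvTrig, List.mem_map] at ht
    obtain ⟨i, hi, rfl⟩ := ht
    rw [PySem.List.mem_pyRange_one] at hi
    obtain ⟨j, rfl⟩ := Int.eq_ofNat_of_zero_le hi.1
    refine ⟨j, ?_⟩
    rw [PySem.Str.toList_slice, PySem.Chars.slice_eq_listSlice,
      show ((j : Int) + 3) = ((j : Int) + ((3 : Nat) : Int)) by norm_num,
      PySem.List.slice_natCast_add]
    exact List.take_prefix _ _
  · rintro ⟨j, hpre⟩
    have hlen2 : 3 ≤ (List.drop j line.toList).length :=
      hlen ▸ hpre.length_le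
    have hjn : j + 3 ≤ line.toList.length := by
      rw [List.length_drop] at hlen2; omega
    have htake : t.toList = List.take 3 (List.drop j line.toList) := by
      rw [List.prefix_iff_eq_take] at hpre
      rw [hpre, hlen]
    simp only [pvTrig, List.mem_map]
    refine ⟨(j : Int), ?_, ?_⟩
    · rw [PySem.List.mem_pyRange_one]
      constructor
      · exact Int.natCast_nonneg j
      · simp only [PySem.Str.len_eq]
        omega
    · apply String.toList_inj.mp
      rw [PySem.Str.toList_slice, PySem.Chars.slice_eq_listSlice,
        show ((j : Int) + 3) = ((j : Int) + ((3 : Nat) : Int)) by norm_num,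
        PySem.List.slice_natCast_add, htake]

-- A's outer loop equals pvG over the enumerated lines (invariant: nodup keys,
-- strictly increasing values bounded by the next index).
theorem outer : ∀ (lines : List String) (n : Int) (d : PySem.Dict String (List Int)),
    d.keys.Nodup →
    (∀ t : String, ∀ x ∈ d.getD t [], x < n) →
    (PySem.List.enumerate lines n).foldl
        (fun index p =>
          if PySem.Str.len p.2 < 3 then index
          else
            (PySem.List.pyRange 0 (PySem.Str.len p.2 - 2) 1).foldl
              (fun index start =>
                index.modify (PySem.Str.slice p.2 (some start) (some (start + 3)))
                  [] (fun s => PySem.Set.add s p.1))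
              index) d
      = pvG (PySem.List.enumerate lines n) d := by
  intro lines
  induction lines with
  | nil => intro n d _ _; rfl
  | cons line rest ih =>
    intro n d hnd hval
    rw [PySem.List.enumerate_cons]
    simp only [List.foldl_cons, pvG] at ih ⊢
    have hb : ∀ t : String, (n : Int) ∉ d.getD t [] := by
      intro t hmem
      exact lt_irrefl n (hval t n hmem)
    have hstepA :
        (if PySem.Str.len line < 3 then d
          else (PySem.List.pyRange 0 (PySem.Str.len line - 2) 1).foldl
            (fun index start =>
              index.modify (PySem.Str.slice line (some start) (some (start + 3)))
                [] (fun s => PySem.Set.add s n)) d)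
          = (pvTrig line).foldl (fun d x => d.modify x [] (fun s => PySem.Set.add s n)) d := by
      rw [pvTrig, List.foldl_map]
      split_ifs with hlen
      · rw [PySem.List.pyRange_one_eq_nil (by omega)]; rfl
      · rfl
    set d' : PySem.Dict String (List Int) :=
      (PySem.List.dedup (pvTrig line)).foldl (fun d x => d.modify x [] (fun s => s ++ [n])) d with hd'
    have hstep :
        (if PySem.Str.len line < 3 then d
          else (PySem.List.pyRange 0 (PySem.Str.len line - 2) 1).foldl
            (fun index start =>
              index.modify (PySem.Str.slice line (some start) (some (start + 3)))
                [] (fun s => PySem.Set.add s n)) d) = d' := by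
      rw [hstepA, hd']
      exact step_eq n (pvTrig line) d hnd hb
    have hnd' : d'.keys.Nodup :=
      PySem.Dict.nodup_keys_foldl_modify_key (PySem.List.dedup (pvTrig line)) (fun x => x) []
        (fun _ _ => fun s => s ++ [n]) d hnd
    have hval' : ∀ t : String, ∀ x ∈ d'.getD t [], x < n + 1 := by
      intro t
      rw [hd', getD_FB n (PySem.List.dedup (pvTrig line)) (PySem.List.nodup_dedup _) d t]
      split_ifs with hmem
      · intro x hx
        rcases List.mem_append.mp hx with h | h
        · have := hval t x h; omega
        · simp only [List.mem_singleton] at h; omega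
      · intro x hx; have := hval t x hx; omega
    rw [hstep]
    exact ih (n + 1) d' hnd' hval'

-- ===== VERDICT (by name: the statement is the Claim_ definition above) =====
theorem build_line_trigram_index_py_spec : Claim_equal_build_line_trigram_index_py := by
  intro lines _dom
  unfold Spec_build_line_trigram_index_py
  unfold build_line_trigram_index_py build_line_trigram_index_py_alt
  simp only [show (PySem.Set.empty : PySem.Set Int) = ([] : List Int) from rfl]
  rw [outer lines 0 PySem.Dict.empty
    (by rw [PySem.Dict.keys_empty]; exact List.nodup_nil)
    (by intro t x hx; rw [PySem.Dict.getD_empty] at hx; simp at hx)]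
  have hnd : (pvG (PySem.List.enumerate lines 0) PySem.Dict.empty).keys.Nodup :=
    pvG_nodup_keys _ _ (by rw [PySem.Dict.keys_empty]; exact List.nodup_nil)
  rw [PySem.Dict.items_eq_map_keys _ hnd [], List.map_map]
  have hkeys : (pvG (PySem.List.enumerate lines 0) PySem.Dict.empty).keys
      = PySem.List.dedup (lines.flatMap (fun line =>
        (PySem.List.pyRange 0 (PySem.Str.len line - 2) 1).map
          (fun i => PySem.Str.slice line (some i) (some (i + 3))))) := by
    rw [pvG_keys, PySem.Dict.keys_empty, PySem.List.dedup_eq_ofList,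
      PySem.Set.ofList_eq_foldl, PySem.Set.update_eq_foldl]
    congr 1
    rw [flatMap_enumerate (fun line => pvTrig line) lines 0]
    rfl
  rw [hkeys]
  apply List.map_congr_left
  intro t htmem
  have ht3 : t.toList.length = 3 := by
    rw [PySem.List.mem_dedup, List.mem_flatMap] at htmem
    obtain ⟨line, _, htl⟩ := htmem
    exact pvTrig_len3 line t htl
  simp only [Function.comp]
  rw [pvG_getD, PySem.Dict.getD_empty, List.nil_append]
  have hfilter : ((PySem.List.enumerate lines 0).filter (fun p => decide (t ∈ pvTrig p.2)))
      = ((PySem.List.enumerate lines 0).filter (fun p => PySem.Str.isIn t p.2)) := by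
    apply List.filter_congr
    intro p _
    by_cases h : t ∈ pvTrig p.2
    · rw [decide_eq_true h, (trig_iff_isIn t p.2 ht3).mp h]
    · have hni : PySem.Str.isIn t p.2 = false :=
        Bool.eq_false_iff.mpr (fun hc => h ((trig_iff_isIn t p.2 ht3).mpr hc))
      rw [decide_eq_false h, hni]
  rw [hfilter]
  congr 1
  have hpw : (((PySem.List.enumerate lines 0).filter (fun p => PySem.Str.isIn t p.2)).map
      (fun p => p.1)).Pairwise (· < ·) := by
    apply List.Pairwise.map
    · exact fun a b h => h
    · exact (PySem.List.pairwise_lt_enumerate lines 0).filter _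
  exact PySem.List.sorted_eq_of_perm_of_pairwise_lt _ _ (fun x => x) (List.Perm.refl _) hpw
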